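-- pv_equiv track=rewrite | github.com/SVCE-ACM/A-December-Of-Algorithms-2023 | December 24/py_gowsrini2004_day_24.py | find_before
-- ===== SOURCE A (Python) =====
-- def find_before(numbers,num):
--     count = 0
--     c = numbers.index(num)
--     for i in range(c-1,-1,-1):
--         if numbers[i] < num:
--             break
--         else:
--             count +=1
--     return(count)
-- ===== SOURCE B (Python) =====
-- def find_before(numbers, num):
--     run = 0
--     for x in numbers:
--         if x == num:
--             return run
--         run = run + 1 if x >= num else 0
--     return numbers.index(num)  # num absent: same ValueError as A
-- ===== Notes on version B (the rewrite author's own statement) =====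
-- stated objective: alternative
-- what changed: Replaces the index lookup followed by a backward scan with break by a single forward pass keeping a running count of consecutive elements >= num that is returned on the first occurrence of num.
import Mathlib
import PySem

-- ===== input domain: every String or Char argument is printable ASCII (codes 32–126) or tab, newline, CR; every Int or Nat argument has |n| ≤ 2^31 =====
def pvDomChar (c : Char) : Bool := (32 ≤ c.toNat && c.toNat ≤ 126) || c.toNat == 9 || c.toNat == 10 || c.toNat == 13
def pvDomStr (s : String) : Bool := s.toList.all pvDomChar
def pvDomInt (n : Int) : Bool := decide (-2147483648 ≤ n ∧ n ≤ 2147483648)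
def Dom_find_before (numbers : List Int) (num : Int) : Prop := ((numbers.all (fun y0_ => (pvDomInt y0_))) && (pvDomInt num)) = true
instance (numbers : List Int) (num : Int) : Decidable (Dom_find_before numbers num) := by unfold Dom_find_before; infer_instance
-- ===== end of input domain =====

-- B replaces A's index lookup + backward scan with break by one forward pass with a running count; same cost (alternative decomposition).

-- ===== PORT A =====
-- the 'for i in range(c-1,-1,-1)' loop with its break, as a count-down recursion over the same state
def find_before_loop (numbers : List Int) (num : Int) (i : Int) (count : Int) : Int :=
  if _h : i < 0 then count
  else
    match PySem.List.pyGet? numbers i with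
    | none => count   -- IndexError cannot occur: i < numbers.index(num) < len(numbers)
    | some v => if v < num then count else find_before_loop numbers num (i - 1) (count + 1)
termination_by (i + 1).toNat
decreasing_by omega

def find_before (numbers : List Int) (num : Int) : Int :=
  match PySem.List.index? numbers num with
  | none => 0          -- Python raises ValueError here; excluded by Pre_find_before
  | some c => find_before_loop numbers num ((c : Int) - 1) 0

-- ===== PORT B =====
-- single forward pass keeping a running count of consecutive elements >= num
def find_before_alt_go (num : Int) : List Int → Int → Int
  | [], _ => 0         -- Python raises ValueError here; excluded by Pre_find_before
  | x :: xs, run => if x = num then run else find_before_alt_go num xs (if x ≥ num then run + 1 else 0)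

def find_before_alt (numbers : List Int) (num : Int) : Int :=
  find_before_alt_go num numbers 0

-- ===== PRECONDITION & SPEC =====
-- Pre_ excludes exactly the inputs where num is absent: Python's list.index raises ValueError there.
def Pre_find_before (numbers : List Int) (num : Int) : Prop := num ∈ numbers
instance (numbers : List Int) (num : Int) : Decidable (Pre_find_before numbers num) := by unfold Pre_find_before; infer_instance
def pvWitness_find_before : List Int × Int := ([3, 5, 2], 2)

def Spec_find_before (numbers : List Int) (num : Int) (out : Int) : Prop := out = find_before_alt numbers num
instance (numbers : List Int) (num : Int) (out : Int) : Decidable (Spec_find_before numbers num out) := by unfold Spec_find_before; infer_instance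

-- ===== CLAIM (what is proved, stated in full; the proofs are below) =====
def Claim_equal_find_before : Prop := ∀ (numbers : List Int) (num : Int), Dom_find_before numbers num → Pre_find_before numbers num → Spec_find_before numbers num (find_before numbers num)

-- ===== LEMMAS AND PROOFS =====

-- length of the maximal all-≥-num prefix of a (reversed) list
def rcount (num : Int) : List Int → Int
  | [] => 0
  | x :: xs => if x < num then 0 else 1 + rcount num xs

theorem find_before_loop_nil (numbers : List Int) (num count : Int) :
    find_before_loop numbers num (-1) count = count := by
  rw [find_before_loop]; simp

theorem find_before_loop_spec (num : Int) (p t : List Int) (count : Int) :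
    find_before_loop (p ++ t) num ((p.length : Int) - 1) count = count + rcount num p.reverse := by
  induction p using List.reverseRecOn generalizing t count with
  | nil => simp [find_before_loop_nil, rcount]
  | append_singleton q x ih =>
    rw [find_before_loop]
    have hlen : ((q ++ [x]).length : Int) - 1 = (q.length : Int) := by simp
    rw [hlen]
    have hget : PySem.List.pyGet? ((q ++ [x]) ++ t) (q.length : Int) = some x := by
      rw [PySem.List.pyGet?_natCast]
      simp
    simp only [show ¬ ((q.length : Int) < 0) from by omega, dite_false, hget]
    by_cases hx : x < num
    · simp [hx, rcount]
    · simp only [hx, if_false]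
      have := ih (x :: t) (count + 1)
      rw [show (q ++ [x]) ++ t = q ++ (x :: t) from by simp] at *
      rw [this]
      simp [rcount, hx]
      ring

-- B's running count as a forward fold over the prefix
def rstate (num : Int) : List Int → Int → Int
  | [], run => run
  | x :: xs, run => rstate num xs (if x ≥ num then run + 1 else 0)

theorem alt_go_prefix (num : Int) (p t : List Int) (run : Int) (hp : num ∉ p) :
    find_before_alt_go num (p ++ num :: t) run = rstate num p run := by
  induction p generalizing run with
  | nil => simp [find_before_alt_go, rstate]
  | cons x xs ih =>
    have hx : x ≠ num := fun h => hp (h ▸ List.mem_cons_self ..)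
    simp only [List.cons_append, find_before_alt_go, rstate, hx, if_false]
    exact ih _ (fun h => hp (List.mem_cons_of_mem _ h))

theorem rstate_append (num : Int) (a b : List Int) (run : Int) :
    rstate num (a ++ b) run = rstate num b (rstate num a run) := by
  induction a generalizing run with
  | nil => simp [rstate]
  | cons x xs ih => simp [rstate, ih]

theorem rstate_eq_rcount (num : Int) (p : List Int) :
    rstate num p 0 = rcount num p.reverse := by
  induction p using List.reverseRecOn with
  | nil => simp [rstate, rcount]
  | append_singleton q x ih =>
    rw [rstate_append]
    simp only [rstate, List.reverse_append, List.reverse_cons, List.reverse_nil,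
      List.nil_append, List.cons_append, rcount, ih]
    by_cases hx : x < num
    · simp [hx, show ¬ x ≥ num from by omega]
    · simp [hx, show x ≥ num from by omega]
      ring

theorem find_before_spec : Claim_equal_find_before := by
  intro numbers num _ hpre
  unfold Spec_find_before
  obtain ⟨c, hc⟩ := Option.isSome_iff_exists.1 ((PySem.List.index?_isSome_iff numbers num).2 hpre)
  obtain ⟨p, t, hdec, hlen, hnp⟩ := (PySem.List.index?_eq_some_iff numbers num c).1 hc
  subst hdec hlen
  unfold find_before find_before_alt
  rw [hc]
  have hA := find_before_loop_spec num p (num :: t) 0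
  simp only []
  rw [hA, alt_go_prefix num p t 0 hnp, rstate_eq_rcount]
  ring
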